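-- pv_equiv track=rewrite | github.com/igachestnut/Hobby_N2 | 02_AtCoder/2023 - 1月～3月/競プロ-競技プログラミングの鉄則/1-アルゴリズムと計算量/Prog_A5.py | all_cheaker
-- ===== SOURCE A (Python) =====
-- def all_cheaker(n,k) :
--     """処理時間O(N**3)"""
--     count = 0
--     for x in range(1,n+1) :
--         for y in range(1,n+1) :
--             for z in range(1,n+1) :
--                 if x+y+z == k :
--                     count += 1
--     return count
-- ===== SOURCE B (Python) =====
-- def all_cheaker(n, k):
--     count = 0
--     for x in range(1, n + 1):
--         lo = max(1, k - x - n)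
--         hi = min(n, k - x - 1)
--         if lo <= hi:
--             count += hi - lo + 1
--     return count
-- ===== Notes on version B (the rewrite author's own statement) =====
-- stated objective: faster
-- what changed: Both inner loops are removed: for each x the number of valid (y,z) pairs is computed in closed form as the length of the interval [max(1,k-x-n), min(n,k-x-1)], turning the O(n^3) triple loop into a single O(n) loop.
import Mathlib
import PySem

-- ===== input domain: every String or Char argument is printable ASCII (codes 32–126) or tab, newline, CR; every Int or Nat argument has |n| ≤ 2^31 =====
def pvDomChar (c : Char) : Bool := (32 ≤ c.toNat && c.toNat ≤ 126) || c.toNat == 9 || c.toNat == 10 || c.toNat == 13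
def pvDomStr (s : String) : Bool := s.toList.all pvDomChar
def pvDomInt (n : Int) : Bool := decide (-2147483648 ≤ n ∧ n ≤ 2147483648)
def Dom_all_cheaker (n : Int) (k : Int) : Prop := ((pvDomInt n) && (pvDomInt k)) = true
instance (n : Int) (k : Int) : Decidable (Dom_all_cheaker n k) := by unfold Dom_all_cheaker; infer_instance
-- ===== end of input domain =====

-- B collapses both inner loops: for each x the number of valid (y,z) pairs is the
-- length of the interval [max(1,k-x-n), min(n,k-x-1)] — O(n) instead of O(n^3).

-- ===== PORT A =====
def all_cheaker (n : Int) (k : Int) : Int :=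
  (PySem.List.pyRange 1 (n+1) 1).foldl (fun c x =>
    (PySem.List.pyRange 1 (n+1) 1).foldl (fun c y =>
      (PySem.List.pyRange 1 (n+1) 1).foldl (fun c z =>
        if x + y + z = k then c + 1 else c) c) c) 0

-- ===== PORT B =====
def all_cheaker_alt (n : Int) (k : Int) : Int :=
  (PySem.List.pyRange 1 (n+1) 1).foldl (fun c x =>
    let lo := max 1 (k - x - n)
    let hi := min n (k - x - 1)
    if lo ≤ hi then c + (hi - lo + 1) else c) 0

-- ===== PRECONDITION & SPEC =====
def Spec_all_cheaker (n : Int) (k : Int) (out : Int) : Prop := out = all_cheaker_alt n k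
instance (n : Int) (k : Int) (out : Int) : Decidable (Spec_all_cheaker n k out) := by unfold Spec_all_cheaker; infer_instance

-- ===== CLAIM (what is proved, stated in full; the proofs are below) =====
def Claim_equal_all_cheaker : Prop := ∀ (n : Int) (k : Int), Dom_all_cheaker n k → Spec_all_cheaker n k (all_cheaker n k)

-- ===== LEMMAS AND PROOFS =====

-- the innermost z-loop contributes 1 exactly when z = k-x-y lies in [a,b)
theorem inner_count (x y k : Int) : ∀ (m : Nat) (a : Int) (init : Int),
    ∀ b : Int, b = a + m →
    (PySem.List.pyRange a b 1).foldl (fun c z => if x + y + z = k then c + 1 else c) init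
      = init + (if a ≤ k - x - y ∧ k - x - y < b then 1 else 0) := by
  intro m
  induction m with
  | zero =>
    intro a init b hb
    rw [PySem.List.pyRange_one_eq_nil (by omega)]
    simp only [List.foldl_nil]
    split <;> omega
  | succ m ih =>
    intro a init b hb
    rw [PySem.List.pyRange_one_cons (by omega)]
    simp only [List.foldl_cons]
    rw [ih (a+1) _ b (by omega)]
    split_ifs <;> omega

-- the middle y-loop over [a, a+m) of the indicator "lo ≤ k-x-y ≤ hi-style bound" sums to
-- the length of the intersected interval
theorem mid_count (x k n : Int) : ∀ (m : Nat) (a : Int) (init : Int),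
    (PySem.List.pyRange a (a + m) 1).foldl
        (fun c y => c + (if 1 ≤ k - x - y ∧ k - x - y < n + 1 then 1 else 0)) init
      = init + max 0 (min (a + m - 1) (k - x - 1) - max a (k - x - n) + 1) := by
  intro m
  induction m with
  | zero =>
    intro a init
    rw [PySem.List.pyRange_one_eq_nil (by omega)]
    simp only [List.foldl_nil]
    omega
  | succ m ih =>
    intro a init
    rw [PySem.List.pyRange_one_cons (by omega)]
    simp only [List.foldl_cons]
    have hstep : a + (((m+1 : Nat)) : Int) = (a+1) + ((m : Nat) : Int) := by push_cast; ring
    rw [hstep]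
    rw [ih (a+1)]
    split_ifs <;> omega

theorem all_cheaker_eq_alt (n k : Int) : all_cheaker n k = all_cheaker_alt n k := by
  unfold all_cheaker all_cheaker_alt
  congr 1
  funext c x
  by_cases hn : 0 ≤ n
  · have hz : (fun (c : Int) (y : Int) =>
        (PySem.List.pyRange 1 (n+1) 1).foldl (fun c z =>
          if x + y + z = k then c + 1 else c) c)
      = (fun (c : Int) (y : Int) => c + (if 1 ≤ k - x - y ∧ k - x - y < n + 1 then 1 else 0)) := by
      funext c y
      exact inner_count x y k n.toNat 1 c (n+1) (by omega)
    rw [hz]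
    have := mid_count x k n n.toNat 1 c
    rw [show (1 : Int) + (n.toNat : Int) = n + 1 by omega] at this
    rw [this]
    simp only []
    split_ifs <;> omega
  · rw [PySem.List.pyRange_one_eq_nil (by omega)]
    simp only [List.foldl_nil]
    split_ifs <;> omega

-- ===== VERDICT =====
theorem all_cheaker_spec : Claim_equal_all_cheaker := by
  intro n k _
  exact all_cheaker_eq_alt n k
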